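-- pv_equiv track=rewrite | github.com/odys-z/hello | acsl-pydev/acsl/lect03p2/c1_agram_sol1.py | agram1
-- ===== SOURCE A (Python) =====
-- def agram1(cards):
-- 	'''
-- 		2 sort with bug
-- 	'''
-- 	# for compare King, Queen, Jack, Ten, ...
-- 	rule = {
-- 		'A': 1, '2': 2, '3': 3, '4': 4, '5': 5,
-- 		'6': 6, '7': 7, '8': 8, '9': 9, 'T': 10,
-- 		'J': 11, 'Q': 12, 'K': 13 }
--
-- 	suit = []         # greater ranks in the suit
-- 	s, r = cards[0][1], rule[cards[0][0]]# spade, rank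
--
-- 	min_r, min_card = 14, None     # minimal rank & card of all cards
-- 	min_s, min_suit = 14, None     # minimal rank & card of the suit
--
-- 	for x in range(1, len(cards)):
-- 		rx = rule[cards[x][0]]     # rank of card x
-- 		if cards[x][1] == s:
-- 			if r < rx:
-- 				suit.append(cards[x])
-- 			if min_s > rx:
-- 				min_s = rx
-- 				min_suit = cards[x]
--
-- 		if min_r > rx:
-- 			min_r = rx
-- 			min_card = cards[x]
--
-- 	if len(suit) > 0:
-- 		suit.sort()	    # Bug here! Though the test cases are validated.
-- 						# try this: ['AD', '9D'].sort()
-- 						# suit.sort(key=lambda r: rule[r[0]], reverse=False)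
-- 		return suit[0]
-- 	elif min_suit is not None:
-- 		return min_suit
-- 	else:
-- 		return min_card
-- ===== SOURCE B (Python) =====
-- def agram1(cards):
--     rule = {
--         'A': 1, '2': 2, '3': 3, '4': 4, '5': 5,
--         '6': 6, '7': 7, '8': 8, '9': 9, 'T': 10,
--         'J': 11, 'Q': 12, 'K': 13 }
--
--     s, r = cards[0][1], rule[cards[0][0]]
--     rest = cards[1:]
--
--     higher = [c for c in rest if c[1] == s and rule[c[0]] > r]
--     if higher:
--         return min(higher)          # plain string min = sorted(higher)[0]
--
--     same = [c for c in rest if c[1] == s]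
--     if same:
--         return min(same, key=lambda c: rule[c[0]])
--     return min(rest, key=lambda c: rule[c[0]])
-- ===== Notes on version B (the rewrite author's own statement) =====
-- stated objective: simpler
-- what changed: Replaces A's single index loop that threads five pieces of mutable state (a growing list, two running minima with sentinels and two None-card slots) by three declarative passes: filter the strictly-higher same-suit cards and take min (reproducing A's plain-string sort()[0]), else min over the same-suit cards by rank, else min over the rest by rank.
-- outside the precondition, e.g. on agram1(['AS']): A returns None, B raises ValueError
import Mathlib
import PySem

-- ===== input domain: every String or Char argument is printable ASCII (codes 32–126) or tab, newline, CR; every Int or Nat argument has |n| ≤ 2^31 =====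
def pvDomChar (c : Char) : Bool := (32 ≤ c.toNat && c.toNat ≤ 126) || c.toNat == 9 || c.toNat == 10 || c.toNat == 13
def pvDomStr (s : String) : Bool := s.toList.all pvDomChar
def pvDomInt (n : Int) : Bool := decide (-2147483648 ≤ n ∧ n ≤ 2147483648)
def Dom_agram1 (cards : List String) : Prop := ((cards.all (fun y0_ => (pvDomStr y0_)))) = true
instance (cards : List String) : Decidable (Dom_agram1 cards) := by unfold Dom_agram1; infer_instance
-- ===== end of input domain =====

-- B replaces A's single five-state index loop by three declarative filter/min passes (simpler; return value only).

-- ===== PORT A =====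
-- the rank table both Python versions declare verbatim
def cardRule : PySem.Dict Char Int :=
  PySem.Dict.ofList [('A',1),('2',2),('3',3),('4',4),('5',5),('6',6),('7',7),('8',8),('9',9),('T',10),('J',11),('Q',12),('K',13)]

def agram1 (cards : List String) : String :=
  let rule := cardRule
  let c0 := PySem.List.pyGetD cards 0 ""
  let s : Char := (PySem.Str.pyGet? c0 1).getD ' '
  let r : Int := rule.getD ((PySem.Str.pyGet? c0 0).getD ' ') 0
  let st :=
    (PySem.List.pyRange 1 (PySem.List.len cards) 1).foldl
      (fun (acc : List String × Int × Option String × Int × Option String) x =>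
        let cx := PySem.List.pyGetD cards x ""
        let rx := rule.getD ((PySem.Str.pyGet? cx 0).getD ' ') 0
        let acc1 :=
          if (PySem.Str.pyGet? cx 1).getD ' ' = s then
            let suit := if r < rx then acc.1 ++ [cx] else acc.1
            if acc.2.2.2.1 > rx then (suit, acc.2.1, acc.2.2.1, rx, some cx)
            else (suit, acc.2.1, acc.2.2.1, acc.2.2.2.1, acc.2.2.2.2)
          else acc
        if acc1.2.1 > rx then (acc1.1, rx, some cx, acc1.2.2.2.1, acc1.2.2.2.2)
        else acc1)
      ([], 14, none, 14, none)
  if st.1.length > 0 then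
    PySem.List.pyGetD (PySem.List.sorted st.1 (fun c => c) false) 0 ""
  else
    match st.2.2.2.2 with
    | some c => c
    | none => (st.2.2.1).getD ""

-- ===== PORT B =====
def agram1_alt (cards : List String) : String :=
  let rule := cardRule
  let c0 := PySem.List.pyGetD cards 0 ""
  let s : Char := (PySem.Str.pyGet? c0 1).getD ' '
  let r : Int := rule.getD ((PySem.Str.pyGet? c0 0).getD ' ') 0
  let rest := PySem.List.slice cards (some 1) none
  let higher := rest.filter
    (fun c => ((PySem.Str.pyGet? c 1).getD ' ' == s) && decide (rule.getD ((PySem.Str.pyGet? c 0).getD ' ') 0 > r))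
  if higher ≠ [] then (PySem.List.min? higher (fun c => c)).getD ""
  else
    let same := rest.filter (fun c => (PySem.Str.pyGet? c 1).getD ' ' == s)
    if same ≠ [] then
      (PySem.List.min? same (fun c => rule.getD ((PySem.Str.pyGet? c 0).getD ' ') 0)).getD ""
    else
      (PySem.List.min? rest (fun c => rule.getD ((PySem.Str.pyGet? c 0).getD ' ') 0)).getD ""

-- ===== PRECONDITION & SPEC =====
-- Pre_ excludes inputs on which Python A raises (empty list, a card shorter than 2 chars, a rank
-- character outside the rule table: IndexError/KeyError) and the singleton list, on which A
-- returns None — not a string value.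
def Pre_agram1 (cards : List String) : Prop :=
  2 ≤ cards.length ∧ ∀ c ∈ cards, 2 ≤ c.toList.length ∧
    c.toList.getD 0 ' ' ∈ (['A','2','3','4','5','6','7','8','9','T','J','Q','K'] : List Char)
instance (cards : List String) : Decidable (Pre_agram1 cards) := by unfold Pre_agram1; infer_instance
def pvWitness_agram1 : List String := (["AS", "2S", "3H"])

def Spec_agram1 (cards : List String) (out : String) : Prop := out = agram1_alt cards
instance (cards : List String) (out : String) : Decidable (Spec_agram1 cards out) := by unfold Spec_agram1; infer_instance

-- ===== CLAIM (what is proved, stated in full; the proofs are below) =====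
def Claim_equal_agram1 : Prop := ∀ (cards : List String), Dom_agram1 cards → Pre_agram1 cards → Spec_agram1 cards (agram1 cards)

-- ===== LEMMAS AND PROOFS =====

-- abbreviations for the two card attributes the programs read
def pvRk (c : String) : Int := cardRule.getD ((PySem.Str.pyGet? c 0).getD ' ') 0
def pvSu (c : String) : Char := (PySem.Str.pyGet? c 1).getD ' '

-- A's loop body, named (definitionally equal to the lambda inside agram1)
def pvStepA (s : Char) (r : Int)
    (acc : List String × Int × Option String × Int × Option String) (cx : String) :
    List String × Int × Option String × Int × Option String :=
  let rx := pvRk cx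
  let acc1 :=
    if pvSu cx = s then
      let suit := if r < rx then acc.1 ++ [cx] else acc.1
      if acc.2.2.2.1 > rx then (suit, acc.2.1, acc.2.2.1, rx, some cx)
      else (suit, acc.2.1, acc.2.2.1, acc.2.2.2.1, acc.2.2.2.2)
    else acc
  if acc1.2.1 > rx then (acc1.1, rx, some cx, acc1.2.2.2.1, acc1.2.2.2.2)
  else acc1

-- a running strict minimum by rank, with its argmin card
def pvRunMin (l : List String) (p : Int × Option String) : Int × Option String :=
  l.foldl (fun p x => if p.1 > pvRk x then (pvRk x, some x) else p) p

lemma pvLoopA (s : Char) (r : Int) (l : List String)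
    (suit : List String) (mr : Int) (mc : Option String) (ms : Int) (msu : Option String) :
    l.foldl (pvStepA s r) (suit, mr, mc, ms, msu) =
      (suit ++ l.filter (fun c => (pvSu c == s) && decide (r < pvRk c)),
       (pvRunMin l (mr, mc)).1, (pvRunMin l (mr, mc)).2,
       (pvRunMin (l.filter (fun c => pvSu c == s)) (ms, msu)).1,
       (pvRunMin (l.filter (fun c => pvSu c == s)) (ms, msu)).2) := by
  induction l generalizing suit mr mc ms msu with
  | nil => simp [pvRunMin]
  | cons x t ih =>
    simp only [List.foldl_cons, List.filter_cons]
    by_cases h1 : pvSu x = s <;> by_cases h2 : r < pvRk x <;>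
      by_cases h3 : ms > pvRk x <;> by_cases h4 : mr > pvRk x <;>
      simp [pvStepA, pvRunMin, h1, h2, h3, h4, ih]

lemma pvMin?_cons_cons (c x : String) (t : List String) (k : String → Int) :
    PySem.List.min? (c :: x :: t) k = PySem.List.min? ((if k x < k c then x else c) :: t) k := by
  simp only [PySem.List.min?, List.foldl_cons]
  by_cases h : k x < k c <;> simp [h]

lemma pvRunMin_snd (l : List String) (c : String) :
    ∃ m, PySem.List.min? (c :: l) pvRk = some m ∧ pvRunMin l (pvRk c, some c) = (pvRk m, some m) := by
  induction l generalizing c with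
  | nil => exact ⟨c, by simp [PySem.List.min?], by simp [pvRunMin]⟩
  | cons x t ih =>
    rw [pvMin?_cons_cons]
    by_cases h : pvRk x < pvRk c
    · obtain ⟨m, h1, h2⟩ := ih x
      refine ⟨m, by simpa [h] using h1, ?_⟩
      simpa [pvRunMin, h] using h2
    · obtain ⟨m, h1, h2⟩ := ih c
      refine ⟨m, by simpa [h] using h1, ?_⟩
      simpa [pvRunMin, h] using h2

lemma pvRunMin_start (l : List String) (h : ∀ x ∈ l, pvRk x < 14) (hne : l ≠ []) :
    ∃ m, PySem.List.min? l pvRk = some m ∧ pvRunMin l (14, none) = (pvRk m, some m) := by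
  match l with
  | [] => exact absurd rfl hne
  | c :: t =>
    have hc : pvRk c < 14 := h c (by simp)
    have hstep : pvRunMin (c :: t) (14, none) = pvRunMin t (pvRk c, some c) := by
      simp [pvRunMin, hc]
    rw [hstep]
    exact pvRunMin_snd t c

lemma pvSortedHead (hl : List String) (hne : hl ≠ []) :
    PySem.List.pyGetD (PySem.List.sorted hl (fun c => c) false) 0 "" =
      (PySem.List.min? hl (fun c => c)).getD "" := by
  obtain ⟨m, tl, hs⟩ : ∃ m tl, PySem.List.sorted hl (fun c => c) false = m :: tl := by
    cases hsort : PySem.List.sorted hl (fun c => c) false with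
    | nil => exact absurd ((PySem.List.sorted_eq_nil_iff _ _ _).mp hsort) hne
    | cons m tl => exact ⟨m, tl, rfl⟩
  obtain ⟨m', hm'⟩ : ∃ m', PySem.List.min? hl (fun c => c) = some m' := by
    cases hmin : PySem.List.min? hl (fun c => c) with
    | none => exact absurd ((PySem.List.min?_eq_none_iff _ _).mp hmin) hne
    | some m' => exact ⟨m', rfl⟩
  have hm : m ∈ hl := (PySem.List.mem_sorted hl (fun c => c) false m).mp (hs ▸ List.mem_cons_self)
  have h1 : m ≤ m' := PySem.List.key_head_sorted_le hl (fun c => c) hs m' (PySem.List.min?_mem hm')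
  have h2 : m' ≤ m := PySem.List.min?_isMin hm' m hm
  rw [hs, PySem.List.pyGetD_zero_cons, hm']
  exact le_antisymm h1 h2

lemma pvRk_lt (c : String) (_h2 : 2 ≤ c.toList.length)
    (hm : c.toList.getD 0 ' ' ∈ (['A','2','3','4','5','6','7','8','9','T','J','Q','K'] : List Char)) :
    pvRk c < 14 := by
  have hch : (PySem.Str.pyGet? c 0).getD ' ' = c.toList.getD 0 ' ' := by
    simp [pysem, List.getD_eq_getElem?_getD]
  unfold pvRk
  rw [hch]
  generalize c.toList.getD 0 ' ' = ch at hm ⊢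
  fin_cases hm <;> decide

-- ===== VERDICT (by name: the statement is the Claim_ definition above) =====
lemma pvRunMin_nil (p : Int × Option String) : pvRunMin [] p = p := rfl

set_option maxHeartbeats 1000000 in
lemma agram1_eq (cards : List String) :
    agram1 cards =
      (let c0 := PySem.List.pyGetD cards 0 ""
       let s := pvSu c0
       let r := pvRk c0
       let st := (PySem.List.pyRange 1 (PySem.List.len cards) 1).foldl
          (fun acc j => pvStepA s r acc (PySem.List.pyGetD cards j "")) ([], 14, none, 14, none)
       if st.1.length > 0 then
         PySem.List.pyGetD (PySem.List.sorted st.1 (fun c => c) false) 0 ""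
       else match st.2.2.2.2 with | some c => c | none => st.2.2.1.getD "") := rfl

lemma agram1_alt_eq (cards : List String) :
    agram1_alt cards =
      (let c0 := PySem.List.pyGetD cards 0 ""
       let s := pvSu c0
       let r := pvRk c0
       let rest := PySem.List.slice cards (some 1) none
       let higher := rest.filter (fun c => (pvSu c == s) && decide (r < pvRk c))
       if higher ≠ [] then (PySem.List.min? higher (fun c => c)).getD ""
       else
         let same := rest.filter (fun c => pvSu c == s)
         if same ≠ [] then (PySem.List.min? same pvRk).getD ""
         else (PySem.List.min? rest pvRk).getD "") := rfl

theorem agram1_spec : Claim_equal_agram1 := by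
  intro cards _ hpre
  obtain ⟨hlen, hall⟩ := hpre
  unfold Spec_agram1
  rcases cards with _ | ⟨c0, rest⟩
  · simp at hlen
  have hrest : rest ≠ [] := by
    intro h; subst h; simp at hlen
  have hrk : ∀ x ∈ rest, pvRk x < 14 := by
    intro x hx
    obtain ⟨h2, hmem⟩ := hall x (List.mem_cons_of_mem _ hx)
    exact pvRk_lt x h2 hmem
  rw [agram1_eq, agram1_alt_eq]
  simp only [PySem.List.len_eq, PySem.List.pyGetD_zero_cons, PySem.List.slice_from_one,
    List.tail_cons]
  rw [PySem.List.foldl_pyRange_pyGetD' (c0 :: rest) "" (pvStepA (pvSu c0) (pvRk c0))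
    ([], 14, none, 14, none) (by norm_num)]
  simp only [Int.toNat_one, List.drop_one, List.tail_cons]
  rw [pvLoopA]
  set s := pvSu c0
  set r := pvRk c0
  by_cases hP : rest.filter (fun c => (pvSu c == s) && decide (r < pvRk c)) = []
  · -- no strictly higher same-suit card
    simp only [List.nil_append, hP, List.length_nil, gt_iff_lt, lt_self_iff_false, if_false,
      ne_eq, not_true_eq_false, ite_not]
    by_cases hS : rest.filter (fun c => pvSu c == s) = []
    · -- no same-suit card at all
      obtain ⟨m, h1, h2⟩ := pvRunMin_start rest hrk hrest
      simp [hS, pvRunMin_nil, h1, h2]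
    · obtain ⟨m, h1, h2⟩ := pvRunMin_start (rest.filter (fun c => pvSu c == s))
        (fun x hx => hrk x (List.mem_of_mem_filter hx)) hS
      simp [hS, h1, h2]
  · simp only [List.nil_append]
    rw [if_pos (by simpa [List.length_pos_iff_ne_nil] using hP), if_pos hP]
    exact pvSortedHead _ hP
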